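-- pv_equiv track=rewrite | github.com/Deadlyfalcon426/Intro_to_CS_with_py_Spring_2026 | word_count_function.py | common_word_count
-- ===== SOURCE A (Python) =====
-- def common_word_count(a, b):
--
--     list_a = a.split(" ")
--     list_b = b.split(" ")
--     set_a = set(list_a)
--     set_b = set(list_b)
--     common_set = set_a.intersection(set_b)
--
--     final_dict=dict()
--     for common_word in common_set:
--         final_dict[common_word] = 0
--     for word in list_a+list_b:
--         if word in common_set:
--             final_dict[word] +=1
--
--     return final_dict
-- ===== SOURCE B (Python) =====
-- def common_word_count(a, b):
--     # Count each string separately, then merge additively over the shared words.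
--     counts_a = {}
--     for w in a.split(" "):
--         counts_a[w] = counts_a.get(w, 0) + 1
--     counts_b = {}
--     for w in b.split(" "):
--         counts_b[w] = counts_b.get(w, 0) + 1
--     return {w: ca + counts_b[w] for w, ca in counts_a.items() if w in counts_b}
-- ===== Notes on version B (the rewrite author's own statement) =====
-- stated objective: simpler
-- what changed: B counts each string independently into its own dict in one pass each and merges the two counts additively over the shared words, instead of A's zero-initialising a dict from a set intersection and then doing a membership-filtered counting pass over the concatenation of both word lists.
import Mathlib
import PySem

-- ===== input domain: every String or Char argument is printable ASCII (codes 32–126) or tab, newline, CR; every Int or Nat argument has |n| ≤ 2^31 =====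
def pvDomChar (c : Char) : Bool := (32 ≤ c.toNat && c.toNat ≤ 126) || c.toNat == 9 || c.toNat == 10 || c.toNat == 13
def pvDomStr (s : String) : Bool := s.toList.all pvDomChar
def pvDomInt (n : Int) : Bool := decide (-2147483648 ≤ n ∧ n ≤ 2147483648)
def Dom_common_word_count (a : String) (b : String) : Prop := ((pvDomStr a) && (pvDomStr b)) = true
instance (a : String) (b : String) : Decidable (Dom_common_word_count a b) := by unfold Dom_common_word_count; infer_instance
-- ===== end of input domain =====

-- B counts each string independently and merges the two counts additively over the shared
-- words, instead of A's zero-init-from-intersection plus a filtered pass over the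
-- concatenation (objective: simpler). Return value only (neither mutates its arguments).
-- Python's dict return value is compared as a set of pairs; the ports realise the
-- (hash-dependent) iteration orders deterministically in first-occurrence order.

-- ===== PORT A =====
-- a.split(" "): sep is the non-empty literal " ", so split? always returns some; .getD [] is exact.
def common_word_count (a : String) (b : String) : List (String × Int) :=
  let list_a := (PySem.Str.split? a " ").getD []
  let list_b := (PySem.Str.split? b " ").getD []
  let set_a := PySem.Set.ofList list_a
  let set_b := PySem.Set.ofList list_b
  let common_set := PySem.Set.inter set_a set_b
  let final0 := common_set.foldl (fun d w => d.insert w (0 : Int)) PySem.Dict.empty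
  -- final_dict[word] += 1: the guard guarantees word is a key, so modify with default 0 is exact
  let final := (list_a ++ list_b).foldl
    (fun d word => if PySem.Set.contains common_set word then d.modify word 0 (· + 1) else d) final0
  final.items

-- ===== PORT B =====
def common_word_count_alt (a : String) (b : String) : List (String × Int) :=
  let counts_a := ((PySem.Str.split? a " ").getD []).foldl
    (fun d w => d.insert w (d.getD w 0 + 1)) PySem.Dict.empty
  let counts_b := ((PySem.Str.split? b " ").getD []).foldl
    (fun d w => d.insert w (d.getD w 0 + 1)) PySem.Dict.empty
  -- the dict comprehension runs over counts_a's (distinct) keys: filter then map is exact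
  (counts_a.items.filter (fun p => counts_b.contains p.1)).map
    (fun p => (p.1, p.2 + counts_b.getD p.1 0))

-- ===== PRECONDITION & SPEC =====
def Spec_common_word_count (a : String) (b : String) (out : List (String × Int)) : Prop := out = common_word_count_alt a b
instance (a : String) (b : String) (out : List (String × Int)) : Decidable (Spec_common_word_count a b out) := by unfold Spec_common_word_count; infer_instance

-- ===== CLAIM (what is proved, stated in full; the proofs are below) =====
def Claim_equal_common_word_count : Prop := ∀ (a : String) (b : String), Dom_common_word_count a b → Spec_common_word_count a b (common_word_count a b)

-- ===== LEMMAS AND PROOFS =====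

-- a fold that skips elements failing a guard is a fold over the filtered list
theorem pv_foldl_ite {α β : Type} (p : α → Bool) (f : β → α → β) :
    ∀ (l : List α) (init : β),
      l.foldl (fun d x => if p x then f d x else d) init = (l.filter p).foldl f init := by
  intro l
  induction l with
  | nil => intro init; rfl
  | cons x xs ih =>
      intro init
      by_cases h : p x = true
      · simp [h, ih]
      · simp only [Bool.not_eq_true] at h
        simp [h, ih]

-- both programs, on the already-split word lists
theorem pv_core (la lb : List String) :
    (let common := PySem.Set.inter (PySem.Set.ofList la) (PySem.Set.ofList lb)
     let final0 := common.foldl (fun d w => d.insert w (0 : Int)) PySem.Dict.empty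
     ((la ++ lb).foldl
        (fun d word => if PySem.Set.contains common word then d.modify word 0 (· + 1) else d)
        final0).items)
    = ((PySem.Dict.counter la).items.filter (fun p => (PySem.Dict.counter lb).contains p.1)).map
        (fun p => (p.1, p.2 + (PySem.Dict.counter lb).getD p.1 0)) := by
  set common : PySem.Set String :=
    PySem.Set.inter (PySem.Set.ofList la) (PySem.Set.ofList lb) with hcommon
  have hnd : common.Nodup := PySem.Set.nodup_inter _ _ (PySem.Set.nodup_ofList la)
  -- zero-initialisation: fresh distinct keys append to the empty dict
  have h0 : (common.foldl (fun d w => d.insert w (0 : Int)) PySem.Dict.empty).items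
      = common.map (fun w => (w, (0 : Int))) := by
    have := PySem.Dict.items_foldl_insert_fresh (l := common) (k := fun w => w)
      (v := fun _ => (0 : Int)) (d := PySem.Dict.empty)
      (by intro a _; simp [PySem.Dict.contains_empty]) (by simpa using hnd)
    simpa using this
  set final0 := common.foldl (fun d w => d.insert w (0 : Int)) PySem.Dict.empty with hf0
  have hk0 : final0.keys = common := by
    simp [PySem.Dict.keys, h0, Function.comp_def]
  -- the guarded counting pass is a pass over the filtered concatenation
  dsimp only
  rw [pv_foldl_ite]
  set flt := (la ++ lb).filter (fun word => PySem.Set.contains common word) with hflt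
  set final := flt.foldl (fun d word => d.modify word 0 (· + 1)) final0 with hfin
  have hmemflt : ∀ y ∈ flt, PySem.Set.contains common y = true := by
    intro y hy
    exact (List.mem_filter.mp hy).2
  have hkeys : final.keys = common := by
    rw [hfin, PySem.Dict.keys_foldl_modify (f := fun _ _ => (· + 1)), hk0,
      PySem.Set.update_eq_append_filter]
    have : (PySem.Set.ofList flt).filter (fun y => !common.contains y) = [] := by
      rw [List.filter_eq_nil_iff]
      intro y hy
      have hyf : y ∈ flt := (PySem.Set.mem_ofList _ _).mp hy
      rw [hmemflt y hyf]
      simp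
    rw [this, List.append_nil]
  have hndk : final.keys.Nodup := by rw [hkeys]; exact hnd
  rw [PySem.Dict.items_eq_map_keys final hndk 0, hkeys]
  -- values on the A side
  have hval : ∀ k ∈ common, final.getD k 0 = ((la.count k : Int) + (lb.count k : Int)) := by
    intro k hk
    have hck : PySem.Set.contains common k = true := (PySem.Set.contains_iff _ _).mpr hk
    have h00 : final0.getD k 0 = 0 := by
      refine PySem.Dict.getD_of_mem_items final0 ?_ (by rw [hk0]; exact hnd) 0
      rw [h0]
      exact List.mem_map.mpr ⟨k, hk, rfl⟩
    rw [hfin, PySem.Dict.getD_foldl_modify_add_one, h00, hflt,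
      List.count_filter hck, List.count_append]
    push_cast
    ring
  -- the B side
  rw [PySem.Dict.items_counter, List.filter_map, List.map_map]
  have hsets : common = (PySem.Set.ofList la).filter
      ((fun p => (PySem.Dict.counter lb).contains p.1) ∘ fun k => (k, (la.count k : Int))) := by
    rw [hcommon]
    show PySem.Set.inter _ _ = _
    unfold PySem.Set.inter
    apply List.filter_congr
    intro x _
    simp [PySem.Dict.contains_counter]
  rw [← hsets]
  apply List.map_congr_left
  intro k hk
  simp only [Function.comp]
  rw [hval k hk, PySem.Dict.getD_counter]

theorem common_word_count_eq (a b : String) :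
    common_word_count a b = common_word_count_alt a b := by
  unfold common_word_count common_word_count_alt
  rw [PySem.Dict.foldl_insert_getD_add_one_eq_counter, PySem.Dict.foldl_insert_getD_add_one_eq_counter]
  exact pv_core _ _

-- ===== VERDICT (by name: the statement is the Claim_ definition above) =====
theorem common_word_count_spec : Claim_equal_common_word_count := by
  intro a b _
  unfold Spec_common_word_count
  exact common_word_count_eq a b
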